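-- pv_equiv track=rewrite | github.com/jchanolm/fcs-v0 | app/utils/helpers.py | clean_query_for_lucene
-- ===== SOURCE A (Python) =====
-- def clean_query_for_lucene(user_query):
--     """
--     Clean and escape a user query for Lucene/Atlas search
--
--     Args:
--         user_query: Raw query from user
--
--     Returns:
--         Cleaned query string safe for Lucene search
--     """
--     if not user_query:
--         return ""
--
--     special_chars = ['/', '\\', '+', '-', '&', '|', '!', '(', ')', '{', '}', '[', ']', '^', '~', '*', '?', ':', '"']
--     cleaned_query = user_query
--
--     for char in special_chars:
--         cleaned_query = cleaned_query.replace(char, ' ')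
--
--     cleaned_query = ' '.join(cleaned_query.split())
--
--     return cleaned_query
-- ===== SOURCE B (Python) =====
-- _SPECIALS = frozenset('/\\+-&|!(){}[]^~*?:"')
--
-- def clean_query_for_lucene(user_query):
--     """Single pass: map each special character to a space, then normalize whitespace."""
--     if not user_query:
--         return ""
--     cleaned = ''.join(' ' if c in _SPECIALS else c for c in user_query)
--     return ' '.join(cleaned.split())
-- ===== Notes on version B (the rewrite author's own statement) =====
-- stated objective: simpler
-- what changed: A runs 19 sequential whole-string str.replace passes; B makes one pass over the query mapping each character to a space via a frozenset membership test, then the same whitespace normalization.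
import Mathlib
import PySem

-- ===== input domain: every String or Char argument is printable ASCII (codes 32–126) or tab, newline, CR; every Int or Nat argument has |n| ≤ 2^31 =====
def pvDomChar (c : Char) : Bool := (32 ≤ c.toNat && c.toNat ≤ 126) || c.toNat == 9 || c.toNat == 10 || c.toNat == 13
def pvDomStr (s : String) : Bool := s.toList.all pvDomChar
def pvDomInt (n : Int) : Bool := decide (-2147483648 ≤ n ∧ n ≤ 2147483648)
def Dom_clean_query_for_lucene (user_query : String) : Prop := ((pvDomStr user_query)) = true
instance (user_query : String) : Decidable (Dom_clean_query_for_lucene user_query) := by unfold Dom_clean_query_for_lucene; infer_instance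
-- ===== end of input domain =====

-- B replaces A's 19 sequential str.replace passes by one pass mapping each character
-- through a set membership test (objective: simpler, one traversal instead of nineteen).


-- ===== PORT A =====
def clean_query_for_lucene (user_query : String) : String :=
  if user_query = "" then ""
  else
    let special_chars : List String :=
      ["/", "\\", "+", "-", "&", "|", "!", "(", ")", "{", "}", "[", "]", "^", "~", "*", "?", ":", "\""]
    let cleaned_query :=
      special_chars.foldl (fun acc ch => PySem.Str.replace acc ch " ") user_query
    PySem.Str.join " " (PySem.Str.split₀ cleaned_query)

-- ===== PORT B =====
def luceneSpecials : PySem.Set Char :=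
  PySem.Set.ofList ['/', '\\', '+', '-', '&', '|', '!', '(', ')', '{', '}', '[', ']', '^', '~', '*', '?', ':', '"']

def clean_query_for_lucene_alt (user_query : String) : String :=
  if user_query = "" then ""
  else
    let cleaned := String.ofList
      (user_query.toList.map (fun c => if PySem.Set.contains luceneSpecials c then ' ' else c))
    PySem.Str.join " " (PySem.Str.split₀ cleaned)

-- ===== PRECONDITION & SPEC =====
def Spec_clean_query_for_lucene (user_query : String) (out : String) : Prop := out = clean_query_for_lucene_alt user_query
instance (user_query : String) (out : String) : Decidable (Spec_clean_query_for_lucene user_query out) := by unfold Spec_clean_query_for_lucene; infer_instance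

-- ===== CLAIM (what is proved, stated in full; the proofs are below) =====
def Claim_equal_clean_query_for_lucene : Prop := ∀ (user_query : String), Dom_clean_query_for_lucene user_query → Spec_clean_query_for_lucene user_query (clean_query_for_lucene user_query)

-- ===== LEMMAS AND PROOFS =====

-- replace with a single-char pattern is a pointwise map (inner worker, fuel ≥ length)
theorem replace_go_single (c d : Char) :
    ∀ (l : List Char) (fuel : Nat) (acc : List Char), l.length ≤ fuel →
      PySem.Chars.replace.go [c] [d] fuel l acc =
        acc.reverse ++ l.map (fun x => if x = c then d else x) := by
  intro l
  induction l with
  | nil =>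
    intro fuel acc _
    cases fuel <;> simp [PySem.Chars.replace.go]
  | cons x t ih =>
    intro fuel acc hf
    cases fuel with
    | zero => simp at hf
    | succ f =>
      rw [PySem.Chars.replace.go]
      by_cases hx : x = c
      · subst hx
        simp only [List.isPrefixOf, BEq.rfl, Bool.and_eq_true, and_true, if_pos]
        have hd : List.drop [x].length (x :: t) = t := rfl
        rw [hd, ih f ([d].reverse ++ acc) (by simpa using Nat.lt_succ_iff.mp (by simpa using hf))]
        simp
      · have hpre : [c].isPrefixOf (x :: t) = false := by
          simp [List.isPrefixOf]
          exact fun h => hx h.symm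
        simp only [hpre, Bool.false_eq_true, if_neg, not_false_iff]
        rw [ih f (x :: acc) (by simpa using Nat.lt_succ_iff.mp (by simpa using hf))]
        simp [hx]

theorem replace_single (cs : List Char) (c d : Char) :
    PySem.Chars.replace cs [c] [d] = cs.map (fun x => if x = c then d else x) := by
  simp [PySem.Chars.replace]
  simpa using replace_go_single c d cs cs.length [] (le_refl _)

-- folding single-char replaces over a list of characters is one membership map
theorem fold_replace_map (L : List Char) :
    ∀ (cs : List Char),
      L.foldl (fun acc c => PySem.Chars.replace acc [c] [' ']) cs =
        cs.map (fun x => if L.contains x then ' ' else x) := by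
  induction L with
  | nil => intro cs; simp
  | cons c L ih =>
    intro cs
    simp only [List.foldl_cons]
    rw [ih, replace_single, List.map_map]
    apply List.map_congr_left
    intro x _
    by_cases hx : x = c <;> simp [Function.comp, hx]

-- the string-level fold of A equals the list-level fold
theorem str_fold (L : List Char) :
    ∀ (s : String),
      (L.map (fun c => String.ofList [c])).foldl (fun acc ch => PySem.Str.replace acc ch " ") s =
        String.ofList (L.foldl (fun acc c => PySem.Chars.replace acc [c] [' ']) s.toList) := by
  induction L with
  | nil => intro s; simp
  | cons c L ih =>
    intro s
    simp only [List.map_cons, List.foldl_cons]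
    rw [ih]
    simp [PySem.Str.replace]

-- ===== VERDICT (by name: the statement is the Claim_ definition above) =====
theorem clean_query_for_lucene_spec : Claim_equal_clean_query_for_lucene := by
  intro q _
  show clean_query_for_lucene q = clean_query_for_lucene_alt q
  have hlist : (["/", "\\", "+", "-", "&", "|", "!", "(", ")", "{", "}", "[", "]", "^", "~",
      "*", "?", ":", "\""] : List String) =
      (['/', '\\', '+', '-', '&', '|', '!', '(', ')', '{', '}', '[', ']', '^', '~', '*', '?',
        ':', '"'] : List Char).map (fun c => String.ofList [c]) := by decide
  have hset : luceneSpecials = ['/', '\\', '+', '-', '&', '|', '!', '(', ')', '{', '}',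
      '[', ']', '^', '~', '*', '?', ':', '"'] := by decide
  have hclean : (["/", "\\", "+", "-", "&", "|", "!", "(", ")", "{", "}", "[", "]", "^", "~",
      "*", "?", ":", "\""] : List String).foldl (fun acc ch => PySem.Str.replace acc ch " ") q =
      String.ofList (q.toList.map
        (fun c => if PySem.Set.contains luceneSpecials c then ' ' else c)) := by
    rw [hlist, str_fold, fold_replace_map, hset]
    simp [PySem.Set.contains]
  by_cases hq : q = ""
  · simp [clean_query_for_lucene, clean_query_for_lucene_alt, hq]
  · simp only [clean_query_for_lucene, clean_query_for_lucene_alt, hq, if_neg,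
      not_false_iff, hclean]
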